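-- pv_equiv track=rewrite | github.com/pypi-data/pypi-mirror-53 | packages/edict/edict-0.50.tar.gz/edict-0.50/edict/edict.py | sub_not_algo
-- ===== SOURCE A (Python) =====
-- import copy
--
-- def sub_not_algo(d,kl,**kwargs):
--     if('deepcopy' in kwargs):
--         deepcopy = kwargs['deepcopy']
--     else:
--         deepcopy = True
--     if(deepcopy):
--         nd = copy.deepcopy(d)
--     else:
--         nd = d
--     full_kl = list(d.keys())
--     nnd = {}
--     for k in full_kl:
--         if(not(k in kl)):
--             nnd[k] = nd[k]
--         else:
--             pass
--     return(nnd)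
-- ===== SOURCE B (Python) =====
-- import copy
--
-- def sub_not_algo(d, kl, **kwargs):
--     deepcopy = kwargs.get('deepcopy', True)
--     nd = copy.deepcopy(d) if deepcopy else dict(d)
--     for k in kl:
--         nd.pop(k, None)
--     return nd
-- ===== Notes on version B (the rewrite author's own statement) =====
-- stated objective: alternative
-- what changed: B builds the result by subtraction (copy d once, then pop each key of kl with a default), instead of A's selection loop over all of d's keys with a membership test against kl.
import Mathlib
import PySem

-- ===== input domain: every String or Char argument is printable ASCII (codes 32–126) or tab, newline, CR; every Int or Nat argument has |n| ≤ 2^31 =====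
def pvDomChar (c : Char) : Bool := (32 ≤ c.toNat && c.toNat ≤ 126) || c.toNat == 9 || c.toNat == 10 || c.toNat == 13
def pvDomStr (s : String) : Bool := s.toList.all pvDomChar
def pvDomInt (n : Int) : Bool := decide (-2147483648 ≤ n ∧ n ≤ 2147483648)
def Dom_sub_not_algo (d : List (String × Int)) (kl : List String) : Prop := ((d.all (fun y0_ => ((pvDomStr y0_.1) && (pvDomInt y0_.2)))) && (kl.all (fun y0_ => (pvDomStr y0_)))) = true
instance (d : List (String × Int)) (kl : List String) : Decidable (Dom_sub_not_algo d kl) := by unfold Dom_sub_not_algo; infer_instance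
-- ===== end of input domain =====

-- B removes the keys of kl from a copy of d (nd.pop(k, None)) instead of A's re-selection
-- of the surviving keys of d into a fresh dict; same return value, a different traversal
-- (alternative). Equivalence is about the RETURN value; neither program mutates its arguments.

-- ===== PORT A =====
-- The deepcopy branch copies values only (nd is value-equal to d), so the port works on the
-- dict built from d directly; nd[k] is total here since k ranges over nd's own keys.
def sub_not_algo (d : List (String × Int)) (kl : List String) : List (String × Int) :=
  let nd := PySem.Dict.ofList d
  let full_kl := nd.keys
  let nnd := full_kl.foldl
    (fun nnd k => if !(kl.contains k) then nnd.insert k (nd.getD k 0) else nnd)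
    PySem.Dict.empty
  nnd.items

-- ===== PORT B =====
-- B's for-loop over kl popping from nd, transcribed as structural recursion on kl;
-- nd.pop(k, None) discards the popped value, which is exactly Dict.erase.
def pvPopAll (nd : PySem.Dict String Int) : List String → PySem.Dict String Int
  | [] => nd
  | k :: rest => pvPopAll (nd.erase k) rest

def sub_not_algo_alt (d : List (String × Int)) (kl : List String) : List (String × Int) :=
  (pvPopAll (PySem.Dict.ofList d) kl).items

-- ===== PRECONDITION & SPEC =====
def Spec_sub_not_algo (d : List (String × Int)) (kl : List String) (out : List (String × Int)) : Prop := out = sub_not_algo_alt d kl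
instance (d : List (String × Int)) (kl : List String) (out : List (String × Int)) : Decidable (Spec_sub_not_algo d kl out) := by unfold Spec_sub_not_algo; infer_instance

-- ===== CLAIM (what is proved, stated in full; the proofs are below) =====
def Claim_equal_sub_not_algo : Prop := ∀ (d : List (String × Int)) (kl : List String), Dom_sub_not_algo d kl → Spec_sub_not_algo d kl (sub_not_algo d kl)

-- ===== LEMMAS AND PROOFS =====

-- B's pop-recursion keeps exactly the items whose key is not in kl.
theorem pvPopAll_items (kl : List String) (D : PySem.Dict String Int) :
    (pvPopAll D kl).items = D.items.filter (fun p => !(kl.contains p.1)) := by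
  induction kl generalizing D with
  | nil => simp [pvPopAll]
  | cons k rest ih =>
      rw [pvPopAll, ih]
      show List.filter _ (D.erase k).items = _
      simp only [PySem.Dict.erase, List.filter_filter]
      apply List.filter_congr
      intro p _
      simp only [List.contains_cons, Bool.not_or]
      exact Bool.and_comm _ _

-- A's selection loop over distinct keys appends, in order, one item per surviving key.
theorem foldl_select_items (kl : List String) (v : String → Int) (L : List String)
    (acc : PySem.Dict String Int) (hnd : L.Nodup)
    (hdisj : ∀ k ∈ L, acc.contains k = false) :
    (L.foldl (fun nnd k => if !(kl.contains k) then nnd.insert k (v k) else nnd) acc).items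
      = acc.items ++ (L.filter (fun k => !(kl.contains k))).map (fun k => (k, v k)) := by
  induction L generalizing acc with
  | nil => simp
  | cons k rest ih =>
      have hk : acc.contains k = false := hdisj k (by simp)
      have hnd' : rest.Nodup := hnd.of_cons
      rw [List.foldl_cons, List.filter_cons]
      by_cases hmem : kl.contains k = true
      · have hmk : k ∈ kl := by simpa using hmem
        have hstep : (if (!kl.contains k) = true then acc.insert k (v k) else acc) = acc := by
          simp [hmk]
        rw [hstep, ih acc hnd' (fun k' hk' => hdisj k' (by simp [hk']))]
        simp [hmk]
      · have hmem' : kl.contains k = false := by simpa using hmem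
        have hmk : k ∉ kl := by simpa using hmem'
        have hstep : (if (!kl.contains k) = true then acc.insert k (v k) else acc)
            = acc.insert k (v k) := by simp [hmk]
        rw [hstep, ih (acc.insert k (v k)) hnd' ?_ ]
        · rw [PySem.Dict.items_insert_of_not_contains _ _ hk]
          simp [hmk]
        · intro k' hk'
          rw [PySem.Dict.contains_insert]
          have hne : k' ≠ k := by
            rintro rfl; exact (List.nodup_cons.mp hnd).1 hk'
          simp [hne, hdisj k' (by simp [hk'])]

-- ===== VERDICT (by name: the statement is the Claim_ definition above) =====
theorem sub_not_algo_spec : Claim_equal_sub_not_algo := by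
  intro d kl _
  unfold Spec_sub_not_algo sub_not_algo sub_not_algo_alt
  set D := PySem.Dict.ofList d with hD
  have hnd : D.keys.Nodup := PySem.Dict.nodup_keys_ofList d
  rw [pvPopAll_items kl D,
      foldl_select_items kl (fun k => D.getD k 0) D.keys PySem.Dict.empty hnd
        (by intro k _; exact PySem.Dict.contains_empty k)]
  rw [PySem.Dict.items_eq_map_keys D hnd 0, List.filter_map]
  rw [show (PySem.Dict.empty : PySem.Dict String Int).items = [] from rfl, List.nil_append]
  exact congrArg _ (List.filter_congr (fun k _ => by simp [Function.comp])).symm
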